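-- pv_equiv track=rewrite | github.com/Cas-Maravilha/MaraBet-AI | unit_management.py | _calculate_max_streak
-- ===== SOURCE A (Python) =====
-- from typing import Dict, List, Tuple, Optional, Union
--
-- def _calculate_max_streak(results: List[bool], is_win: bool) -> int:
--     """Calcula sequência máxima de vitórias ou derrotas"""
--     current_streak = 0
--     max_streak = 0
--
--     for result in results:
--         if result == is_win:
--             current_streak += 1
--             max_streak = max(max_streak, current_streak)
--         else:
--             current_streak = 0
--
--     return max_streak
-- ===== SOURCE B (Python) =====
-- def _calculate_max_streak(results, is_win):
--     """Max streak via mismatch boundaries: positions of non-matching results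
--     (with sentinels -1 and len(results)) and the max gap between neighbours."""
--     bounds = [-1] + [i for i, r in enumerate(results) if r != is_win] + [len(results)]
--     return max(b - a - 1 for a, b in zip(bounds, bounds[1:]))
-- ===== Notes on version B (the rewrite author's own statement) =====
-- stated objective: alternative
-- what changed: Replaces A's running current/max streak counters with a staged boundary computation: first collect the indices of non-matching results (with sentinels -1 and len(results)), then return the maximum gap between consecutive boundary positions.
import Mathlib
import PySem

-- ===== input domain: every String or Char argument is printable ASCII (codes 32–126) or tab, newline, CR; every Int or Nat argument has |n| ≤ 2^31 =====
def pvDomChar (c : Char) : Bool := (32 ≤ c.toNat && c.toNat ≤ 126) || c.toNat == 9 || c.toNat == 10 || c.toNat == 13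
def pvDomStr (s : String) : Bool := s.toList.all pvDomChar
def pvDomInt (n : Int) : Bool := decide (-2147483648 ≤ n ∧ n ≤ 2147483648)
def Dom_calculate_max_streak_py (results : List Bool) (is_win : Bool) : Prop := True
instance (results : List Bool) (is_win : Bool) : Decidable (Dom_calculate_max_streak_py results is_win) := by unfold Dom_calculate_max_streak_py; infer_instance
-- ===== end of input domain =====

-- B replaces A's running current/max streak counters with a staged boundary
-- computation: collect the indices of non-matching results (with sentinels -1
-- and len), then take the max gap between consecutive boundaries (alternative; same cost).

-- ===== PORT A =====
-- one loop step of A: updates (current_streak, max_streak)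
def stepA (is_win : Bool) (st : Int × Int) (result : Bool) : Int × Int :=
  if result == is_win then (st.1 + 1, max st.2 (st.1 + 1)) else (0, st.2)

def calculate_max_streak_py (results : List Bool) (is_win : Bool) : Int :=
  (results.foldl (stepA is_win) (0, 0)).2

-- ===== PORT B =====
def calculate_max_streak_py_alt (results : List Bool) (is_win : Bool) : Int :=
  -- bounds = [-1] + [i for i, r in enumerate(results) if r != is_win] + [len(results)]
  let bounds : List Int :=
    -1 :: ((PySem.List.enumerate results 0).filterMap
        (fun p => if p.2 != is_win then some p.1 else none)) ++ [(results.length : Int)]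
  -- max(b - a - 1 for a, b in zip(bounds, bounds[1:]))
  let gaps := (bounds.zip bounds.tail).map (fun q => q.2 - q.1 - 1)
  match gaps with
  | [] => 0            -- unreachable: bounds has ≥ 2 elements, so gaps ≠ []
  | g :: gs => gs.foldl max g

-- ===== PRECONDITION & SPEC =====
def Spec_calculate_max_streak_py (results : List Bool) (is_win : Bool) (out : Int) : Prop := out = calculate_max_streak_py_alt results is_win
instance (results : List Bool) (is_win : Bool) (out : Int) : Decidable (Spec_calculate_max_streak_py results is_win out) := by unfold Spec_calculate_max_streak_py; infer_instance

-- ===== CLAIM (what is proved, stated in full; the proofs are below) =====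
def Claim_equal_calculate_max_streak_py : Prop := ∀ (results : List Bool) (is_win : Bool), Dom_calculate_max_streak_py results is_win → Spec_calculate_max_streak_py results is_win (calculate_max_streak_py results is_win)

-- ===== LEMMAS AND PROOFS =====

-- mathematical spec: leading matching streak / max matching streak
def fstreak (w : Bool) : List Bool → Int
  | [] => 0
  | x :: xs => if x == w then 1 + fstreak w xs else 0

def mstreak (w : Bool) : List Bool → Int
  | [] => 0
  | x :: xs => if x == w then max (1 + fstreak w xs) (mstreak w xs) else mstreak w xs

-- recursive view of B: mismatch index list, gap list, max gap
def mism (w : Bool) (s : Int) : List Bool → List Int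
  | [] => []
  | x :: xs => (if x != w then [s] else []) ++ mism w (s + 1) xs

def maxGaps (p : Int) : List Int → Int → Int
  | [], n => n - p - 1
  | i :: is, n => max (i - p - 1) (maxGaps i is n)

def gapsR (p : Int) : List Int → Int → List Int
  | [], n => [n - p - 1]
  | i :: is, n => (i - p - 1) :: gapsR i is n

def headB (is : List Int) (n : Int) : Int :=
  match is with
  | [] => n
  | i :: _ => i

theorem fstreak_nonneg (w : Bool) (xs : List Bool) : 0 ≤ fstreak w xs := by
  induction xs with
  | nil => simp [fstreak]
  | cons x xs ih => by_cases h : x == w <;> simp [fstreak, h] <;> omega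

theorem mstreak_nonneg (w : Bool) (xs : List Bool) : 0 ≤ mstreak w xs := by
  induction xs with
  | nil => simp [mstreak]
  | cons x xs ih =>
      have := fstreak_nonneg w xs
      by_cases h : x == w <;> simp [mstreak, h] <;> omega

theorem fstreak_le_mstreak (w : Bool) (xs : List Bool) : fstreak w xs ≤ mstreak w xs := by
  induction xs with
  | nil => simp [fstreak, mstreak]
  | cons x xs ih =>
      have := mstreak_nonneg w xs
      by_cases h : x == w <;> simp [fstreak, mstreak, h] <;> omega

-- A's loop, with generalized state
theorem foldA (w : Bool) (xs : List Bool) : ∀ (c m : Int), 0 ≤ c → c ≤ m →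
    (xs.foldl (stepA w) (c, m)).2 = max m (max (c + fstreak w xs) (mstreak w xs)) := by
  induction xs with
  | nil =>
      intro c m h0 h1
      simp [fstreak, mstreak]
      omega
  | cons x xs ih =>
      intro c m h0 h1
      have hf := fstreak_nonneg w xs
      have hm := mstreak_nonneg w xs
      have hfm := fstreak_le_mstreak w xs
      by_cases h : x == w
      · have := ih (c + 1) (max m (c + 1)) (by omega) (by omega)
        simp [stepA, h, fstreak, mstreak, this]
        omega
      · have := ih 0 m le_rfl (by omega)
        simp [stepA, h, fstreak, mstreak, this]
        omega

theorem calcA_eq_mstreak (w : Bool) (xs : List Bool) :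
    calculate_max_streak_py xs w = mstreak w xs := by
  have hf := fstreak_nonneg w xs
  have hm := mstreak_nonneg w xs
  have hfm := fstreak_le_mstreak w xs
  unfold calculate_max_streak_py
  rw [foldA w xs 0 0 le_rfl le_rfl]
  omega

-- mism agrees with the port's enumerate/filterMap computation
theorem mism_eq_filterMap (w : Bool) (xs : List Bool) : ∀ (s : Int),
    (PySem.List.enumerate xs s).filterMap
      (fun p => if p.2 != w then some p.1 else none) = mism w s xs := by
  induction xs with
  | nil => intro s; simp [PySem.List.enumerate_nil, mism]
  | cons x xs ih =>
      intro s
      rw [PySem.List.enumerate_cons, List.filterMap_cons, ih (s + 1)]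
      by_cases h : x = w <;> simp [mism, h]

-- the zip/map gap list is gapsR
theorem gaps_eq_gapsR (f : Int × Int → Int) (hf : ∀ q, f q = q.2 - q.1 - 1) :
    ∀ (is : List Int) (p n : Int),
    ((p :: is ++ [n]).zip (is ++ [n])).map f = gapsR p is n := by
  intro is
  induction is with
  | nil => intro p n; simp [gapsR, hf]
  | cons i is ih =>
      intro p n
      simp only [List.cons_append, List.zip_cons_cons, List.map_cons, gapsR, hf]
      rw [← List.cons_append]
      exact congrArg _ (ih i n)

theorem foldl_gapsR : ∀ (is : List Int) (p n g : Int),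
    (gapsR p is n).foldl max g = max g (maxGaps p is n) := by
  intro is
  induction is with
  | nil => intro p n g; simp [gapsR, maxGaps]
  | cons i is ih =>
      intro p n g
      simp only [gapsR, maxGaps, List.foldl_cons, ih]
      omega

theorem match_gapsR (is : List Int) (p n : Int) :
    (match gapsR p is n with | [] => (0:Int) | g :: gs => gs.foldl max g) = maxGaps p is n := by
  cases is with
  | nil => simp [gapsR, maxGaps]
  | cons i is => simp [gapsR, maxGaps, foldl_gapsR]

-- shift invariance of maxGaps
theorem maxGaps_shift (k : Int) : ∀ (is : List Int) (p n : Int),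
    maxGaps (p + k) (is.map (· + k)) (n + k) = maxGaps p is n := by
  intro is
  induction is with
  | nil => intro p n; simp [maxGaps]
  | cons i is ih =>
      intro p n
      simp only [List.map_cons, maxGaps, ih i n]
      omega

theorem maxGaps_lower (is : List Int) (n : Int) (p q : Int) (h : q ≤ p) :
    maxGaps q is n = max (headB is n - q - 1) (maxGaps p is n) := by
  cases is with
  | nil => simp [maxGaps, headB]; omega
  | cons i is => simp [maxGaps, headB]; omega

theorem mism_shift (w : Bool) : ∀ (xs : List Bool) (s : Int),
    mism w s xs = (mism w 0 xs).map (· + s) := by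
  intro xs
  induction xs with
  | nil => intro s; simp [mism]
  | cons x xs ih =>
      intro s
      simp only [mism]
      rw [ih (s + 1), ih (0 + 1), List.map_append, List.map_map]
      refine congrArg₂ _ ?_ ?_
      · cases hx : x != w <;> simp [hx]
      · refine List.map_congr_left ?_
        intro a _
        simp only [Function.comp_apply]
        ring

theorem headB_mism (w : Bool) (xs : List Bool) :
    headB (mism w 0 xs) ((xs.length : Int)) = fstreak w xs := by
  induction xs with
  | nil => simp [mism, headB, fstreak]
  | cons x xs ih =>
      by_cases h : x = w
      · have h1 : mism w 0 (x :: xs) = (mism w 0 xs).map (· + 1) := by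
          rw [show mism w 0 (x :: xs) = mism w (0 + 1) xs by simp [mism, h]]
          rw [show (0:Int) + 1 = 1 by norm_num]
          exact mism_shift w xs 1
        have hf : fstreak w (x :: xs) = 1 + fstreak w xs := by simp [fstreak, h]
        rw [h1, hf, ← ih]
        cases mism w 0 xs with
        | nil => simp [headB]; ring
        | cons i is => simp [headB]; ring
      · have h1 : mism w 0 (x :: xs) = 0 :: mism w (0 + 1) xs := by simp [mism, h]
        simp [h1, headB, fstreak, h]

theorem maxGaps_mism (w : Bool) (xs : List Bool) :
    maxGaps (-1) (mism w 0 xs) ((xs.length : Int)) = mstreak w xs := by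
  induction xs with
  | nil => simp [mism, maxGaps, mstreak]
  | cons x xs ih =>
      have hm := mstreak_nonneg w xs
      have h2 : ((x :: xs).length : Int) = (xs.length : Int) + 1 := by
        push_cast [List.length_cons]; ring
      by_cases h : x = w
      · have h1 : mism w 0 (x :: xs) = (mism w 0 xs).map (· + 1) := by
          rw [show mism w 0 (x :: xs) = mism w (0 + 1) xs by simp [mism, h]]
          rw [show (0:Int) + 1 = 1 by norm_num]
          exact mism_shift w xs 1
        rw [h1, h2]
        have h3 := maxGaps_shift 1 (mism w 0 xs) (-2) ((xs.length : Int))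
        rw [show (-2 : Int) + 1 = -1 by norm_num] at h3
        rw [h3]
        rw [maxGaps_lower (mism w 0 xs) ((xs.length : Int)) (-1) (-2) (by norm_num)]
        rw [ih, headB_mism]
        simp [mstreak, h]
        omega
      · have h1 : mism w 0 (x :: xs) = 0 :: (mism w 0 xs).map (· + 1) := by
          rw [show mism w 0 (x :: xs) = 0 :: mism w (0 + 1) xs by simp [mism, h]]
          rw [show (0:Int) + 1 = 1 by norm_num]
          rw [mism_shift w xs 1]
        rw [h1, h2]
        simp only [maxGaps]
        have h3 := maxGaps_shift 1 (mism w 0 xs) (-1) ((xs.length : Int))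
        rw [show (-1 : Int) + 1 = 0 by norm_num] at h3
        rw [h3, ih]
        simp [mstreak, h]
        omega

-- ===== VERDICT (by name: the statement is the Claim_ definition above) =====
theorem calculate_max_streak_py_spec : Claim_equal_calculate_max_streak_py := by
  intro results is_win _
  unfold Spec_calculate_max_streak_py
  rw [calcA_eq_mstreak]
  simp only [calculate_max_streak_py_alt, mism_eq_filterMap]
  rw [show (-1 :: mism is_win 0 results ++ [(results.length : Int)]).tail
        = mism is_win 0 results ++ [(results.length : Int)] from rfl]
  rw [gaps_eq_gapsR (fun q => q.2 - q.1 - 1) (fun q => rfl) (mism is_win 0 results) (-1)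
    ((results.length : Int))]
  rw [match_gapsR, maxGaps_mism]
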